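-- pv_equiv track=rewrite | github.com/JeromeLefebvre/ProjectEuler | Python/Problem119.py | aPowerOfDigit
-- ===== SOURCE A (Python) =====
-- def digitSum(n):
-- 	return sum(int(a) for a in str(n))
--
-- def aPowerOfDigit(n):
-- 	s = digitSum(n)
-- 	exp = 1
-- 	if s == 1:
-- 		return False
-- 	while s**exp < n:
-- 		exp += 1
-- 	return s**exp == n
-- ===== SOURCE B (Python) =====
-- def aPowerOfDigit(n):
-- 	# digit sum by arithmetic instead of string conversion
-- 	m, s = n, 0
-- 	while m > 0:
-- 		s += m % 10
-- 		m //= 10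
-- 	if s <= 1:
-- 		return n == 0
-- 	# divide out factors of s instead of building s**exp upward
-- 	while n % s == 0:
-- 		n //= s
-- 	return n == 1
-- ===== Notes on version B (the rewrite author's own statement) =====
-- stated objective: alternative
-- what changed: B computes the digit sum arithmetically (mod/div 10) instead of converting to a string, and tests power-ness by dividing n down by the digit sum until it stops instead of building s**exp upward and comparing.
import Mathlib
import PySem

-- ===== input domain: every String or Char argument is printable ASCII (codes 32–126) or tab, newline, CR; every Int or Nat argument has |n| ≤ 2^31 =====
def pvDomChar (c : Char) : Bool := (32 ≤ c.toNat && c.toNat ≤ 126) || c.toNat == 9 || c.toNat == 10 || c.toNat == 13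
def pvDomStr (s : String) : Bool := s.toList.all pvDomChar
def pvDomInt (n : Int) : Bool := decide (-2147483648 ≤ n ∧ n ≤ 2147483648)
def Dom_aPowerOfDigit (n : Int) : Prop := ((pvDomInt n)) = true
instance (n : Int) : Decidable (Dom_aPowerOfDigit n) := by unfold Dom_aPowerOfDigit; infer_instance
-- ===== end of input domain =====

-- B computes the digit sum arithmetically and divides n down by the digit sum instead of
-- building powers of it upward (objective: alternative, simpler control flow).


-- ===== PORT A =====
-- sum(int(a) for a in str(n)); none = ValueError (the '-' of a negative n)
def pvDigitSumA? (n : Int) : Option Int :=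
  match (PySem.Int.toChars n).mapM (fun a => PySem.Int.ofChars? [a]) with
  | none => none
  | some xs => some xs.sum

-- while s**exp < n: exp += 1; then return s**exp == n  (fuel only makes the loop total;
-- under Pre_ the loop always stops before the fuel runs out)
def pvPowLoopA (s n : Int) : Nat → Nat → Bool
  | 0, exp => s ^ exp == n
  | f+1, exp => if s ^ exp < n then pvPowLoopA s n f (exp + 1) else s ^ exp == n

def aPowerOfDigit (n : Int) : Bool :=
  match pvDigitSumA? n with
  | none => false   -- ValueError; excluded by Pre_
  | some s => if s == 1 then false else pvPowLoopA s n (n.toNat + 2) 1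

-- ===== PORT B =====
-- while m > 0: s += m % 10; m //= 10  (fuel is a totality guard; m strictly shrinks)
def pvDigitLoopB : Nat → Int → Int → Int
  | 0, _, s => s
  | f+1, m, s =>
      if 0 < m then pvDigitLoopB f (PySem.Int.floordiv m 10) (s + PySem.Int.mod m 10) else s

-- while n % s == 0: n //= s  (fuel is a totality guard; under the s ≥ 2 branch n shrinks)
def pvDivLoopB (s : Int) : Nat → Int → Int
  | 0, n => n
  | f+1, n => if PySem.Int.mod n s == 0 then pvDivLoopB s f (PySem.Int.floordiv n s) else n

def aPowerOfDigit_alt (n : Int) : Bool :=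
  let s := pvDigitLoopB (n.toNat + 1) n 0
  if s ≤ 1 then n == 0
  else pvDivLoopB s (n.toNat + 2) n == 1

-- ===== PRECONDITION & SPEC =====
-- A raises ValueError on negative n (int('-') while summing the characters of str(n)).
def Pre_aPowerOfDigit (n : Int) : Prop := 0 ≤ n
instance (n : Int) : Decidable (Pre_aPowerOfDigit n) := by unfold Pre_aPowerOfDigit; infer_instance

def pvWitness_aPowerOfDigit : Int := 512

def Spec_aPowerOfDigit (n : Int) (out : Bool) : Prop := out = aPowerOfDigit_alt n
instance (n : Int) (out : Bool) : Decidable (Spec_aPowerOfDigit n out) := by unfold Spec_aPowerOfDigit; infer_instance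

-- ===== CLAIM (what is proved, stated in full; the proofs are below) =====
def Claim_equal_aPowerOfDigit : Prop := ∀ (n : Int), Dom_aPowerOfDigit n → Pre_aPowerOfDigit n → Spec_aPowerOfDigit n (aPowerOfDigit n)

-- ===== LEMMAS AND PROOFS =====

-- reference digit sum (proof-only)
def pvDig (m : Nat) : Nat := (Nat.digits 10 m).sum

theorem pvDig_zero : pvDig 0 = 0 := rfl

theorem pvDig_eq (m : Nat) (hm : 0 < m) : pvDig m = m % 10 + pvDig (m / 10) := by
  unfold pvDig
  rw [Nat.digits_def' (by norm_num) hm]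
  simp

theorem pvDig_pos (m : Nat) (hm : 0 < m) : 0 < pvDig m := by
  induction m using Nat.strong_induction_on with
  | _ m ih =>
    rw [pvDig_eq m hm]
    rcases Nat.eq_zero_or_pos (m % 10) with h | h
    · have h10 : 0 < m / 10 := by omega
      have := ih (m / 10) (by omega) h10
      omega
    · omega

theorem pvDig_one : pvDig 1 = 1 := by
  rw [pvDig_eq 1 (by norm_num)]
  norm_num [pvDig_zero]

theorem pvDig_ge_two (m : Nat) (h : 2 ≤ pvDig m) : 2 ≤ m := by
  by_contra hc
  interval_cases m
  · rw [pvDig_zero] at h; omega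
  · rw [pvDig_one] at h; omega

-- int of a single decimal digit character
theorem pvOfDigitChar (d : Nat) (h : d < 10) :
    PySem.Int.ofChars? [Nat.digitChar d] = some (d : Int) := by
  interval_cases d <;> decide

-- A's string digit sum computes pvDig
theorem pvDig_lt_ten (m : Nat) (h : m < 10) : pvDig m = m := by
  rcases Nat.eq_zero_or_pos m with h0 | h0
  · subst h0; rfl
  · rw [pvDig_eq m h0]
    have h1 : m % 10 = m := by omega
    have h2 : m / 10 = 0 := by omega
    rw [h1, h2, pvDig_zero]
    omega

theorem pvDigitSumA_toDigits (m : Nat) : ∃ xs : List Int,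
    ((Nat.toDigits 10 m).mapM (fun a => PySem.Int.ofChars? [a])) = some xs ∧
      xs.sum = (pvDig m : Int) := by
  induction m using Nat.strong_induction_on with
  | _ m ih =>
    by_cases hlt : m < 10
    · refine ⟨[(m : Int)], ?_, ?_⟩
      · rw [Nat.toDigits_of_lt_base hlt]
        simp [List.mapM_cons, pvOfDigitChar m hlt]
      · simp [pvDig_lt_ten m hlt]
    · have hge : 10 ≤ m := by omega
      obtain ⟨xs, hxs, hsum⟩ := ih (m / 10) (by omega)
      refine ⟨xs ++ [((m % 10 : Nat) : Int)], ?_, ?_⟩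
      · rw [Nat.toDigits_of_base_le (by norm_num) hge, List.mapM_append, hxs]
        simp [List.mapM_cons, pvOfDigitChar (m % 10) (by omega)]
      · rw [List.sum_append, hsum, pvDig_eq m (by omega), List.sum_singleton]
        push_cast
        ring

theorem pvDigitSumA_eq (m : Nat) : pvDigitSumA? (m : Int) = some (pvDig m : Int) := by
  unfold pvDigitSumA?
  have ht : PySem.Int.toChars (m : Int) = Nat.toDigits 10 m := by
    unfold PySem.Int.toChars
    have : ¬ ((m : Int) < 0) := by omega
    simp [this]
  obtain ⟨xs, hxs, hsum⟩ := pvDigitSumA_toDigits m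
  rw [ht, hxs]
  show some xs.sum = some ((pvDig m : Nat) : Int)
  rw [hsum]

-- B's arithmetic loop computes pvDig
theorem pvDigitLoopB_eq (f : Nat) : ∀ (m : Nat) (s : Int), m < f →
    pvDigitLoopB f (m : Int) s = s + (pvDig m : Int) := by
  induction f with
  | zero => intro m s h; omega
  | succ f ih =>
    intro m s h
    rcases Nat.eq_zero_or_pos m with h0 | h0
    · subst h0; simp [pvDigitLoopB, pvDig_zero]
    · have hpos : (0 : Int) < (m : Int) := by exact_mod_cast h0
      simp only [pvDigitLoopB, if_pos hpos]
      have e1 : PySem.Int.floordiv (m : Int) 10 = ((m / 10 : Nat) : Int) := by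
        exact_mod_cast PySem.Int.floordiv_natCast m 10
      have e2 : PySem.Int.mod (m : Int) 10 = ((m % 10 : Nat) : Int) := by
        exact_mod_cast PySem.Int.mod_natCast m 10
      rw [e1, e2, ih (m / 10) _ (by omega), pvDig_eq m h0]
      push_cast
      ring

-- A's loop decides "n is a positive power of s"
theorem pvPowLoopA_eq (s n : Int) (hs : 2 ≤ s) (hn : 1 ≤ n) :
    ∀ (f e : Nat), 1 ≤ e → n.toNat + 1 ≤ e + f →
      (pvPowLoopA s n f e = true ↔ ∃ k : Nat, e ≤ k ∧ s ^ k = n) := by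
  intro f
  induction f with
  | zero =>
    intro e he hfuel
    have hbig : n < s ^ e := by
      have h1 : n.toNat < 2 ^ e := by
        calc n.toNat < e := by omega
        _ < 2 ^ e := Nat.lt_two_pow_self
      have h2 : (2 : Int) ^ e ≤ s ^ e := pow_le_pow_left₀ (by norm_num) hs e
      have : (n.toNat : Int) < ((2 ^ e : Nat) : Int) := by exact_mod_cast h1
      have hn' : (n.toNat : Int) = n := by omega
      push_cast at this
      omega
    simp only [pvPowLoopA, beq_iff_eq]
    constructor
    · intro h; exact ⟨e, le_refl e, h⟩
    · rintro ⟨k, hk, hsk⟩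
      have : s ^ e ≤ s ^ k := pow_le_pow_right₀ (by omega) hk
      omega
  | succ f ih =>
    intro e he hfuel
    simp only [pvPowLoopA]
    by_cases hlt : s ^ e < n
    · rw [if_pos hlt, ih (e + 1) (by omega) (by omega)]
      constructor
      · rintro ⟨k, hk, hsk⟩; exact ⟨k, by omega, hsk⟩
      · rintro ⟨k, hk, hsk⟩
        refine ⟨k, ?_, hsk⟩
        rcases Nat.lt_or_ge k (e + 1) with hke | hke
        · have : k = e := by omega
          subst this; omega
        · exact hke
    · rw [if_neg hlt]
      simp only [beq_iff_eq]
      constructor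
      · intro h; exact ⟨e, le_refl e, h⟩
      · rintro ⟨k, hk, hsk⟩
        rcases Nat.eq_or_lt_of_le hk with hke | hke
        · rw [← hke] at hsk; exact hsk
        · exfalso
          have : s ^ e < s ^ k := by
            apply pow_lt_pow_right₀ (by omega) hke
          omega

-- B's loop decides "n is a (possibly zeroth) power of s"
theorem pvDivLoopB_eq (s : Int) (hs : 2 ≤ s) :
    ∀ (f : Nat) (n : Int), 1 ≤ n → n.toNat ≤ f →
      (pvDivLoopB s f n = 1 ↔ ∃ k : Nat, s ^ k = n) := by
  intro f
  induction f with
  | zero => intro n hn hfuel; omega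
  | succ f ih =>
    intro n hn hfuel
    simp only [pvDivLoopB]
    by_cases hdvd : PySem.Int.mod n s == 0
    · rw [if_pos hdvd]
      have hdvd' : s ∣ n := by
        rw [← PySem.Int.mod_eq_zero_iff_dvd]
        exact beq_iff_eq.mp hdvd
      obtain ⟨c, hc⟩ := hdvd'
      have hc1 : 1 ≤ c := by nlinarith
      have hfd : PySem.Int.floordiv n s = c := by
        rw [PySem.Int.floordiv_eq_ediv_of_pos (by omega), hc]
        rw [Int.mul_ediv_cancel_left _ (by omega)]
      have hcf : c.toNat ≤ f := by
        have : c < n := by nlinarith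
        omega
      rw [hfd, ih c hc1 hcf]
      constructor
      · rintro ⟨k, hk⟩; exact ⟨k + 1, by rw [pow_succ, hk, hc]; ring⟩
      · rintro ⟨k, hk⟩
        rcases Nat.eq_zero_or_pos k with h0 | h0
        · subst h0; simp at hk; nlinarith
        · obtain ⟨k', rfl⟩ : ∃ k', k = k' + 1 := ⟨k - 1, by omega⟩
          refine ⟨k', ?_⟩
          have : s * s ^ k' = s * c := by
            rw [← hc, ← hk, pow_succ]; ring
          exact mul_left_cancel₀ (by omega) this
    · rw [if_neg (by simpa using hdvd)]
      have hnd : ¬ (s ∣ n) := by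
        rw [← PySem.Int.mod_eq_zero_iff_dvd]
        simpa using hdvd
      constructor
      · intro h; exact ⟨0, by simpa using h.symm⟩
      · rintro ⟨k, hk⟩
        rcases Nat.eq_zero_or_pos k with h0 | h0
        · subst h0; simpa using hk.symm
        · exfalso
          apply hnd
          obtain ⟨k', rfl⟩ : ∃ k', k = k' + 1 := ⟨k - 1, by omega⟩
          exact ⟨s ^ k', by rw [← hk, pow_succ]; ring⟩

-- ===== VERDICT (by name: the statement is the Claim_ definition above) =====
theorem aPowerOfDigit_spec : Claim_equal_aPowerOfDigit := by
  intro n _ hpre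
  unfold Spec_aPowerOfDigit
  obtain ⟨m, rfl⟩ : ∃ m : Nat, n = (m : Int) :=
    ⟨n.toNat, (Int.toNat_of_nonneg hpre).symm⟩
  unfold aPowerOfDigit aPowerOfDigit_alt
  rw [pvDigitSumA_eq m]
  simp only [Int.toNat_natCast]
  rw [pvDigitLoopB_eq (m + 1) m 0 (by omega), zero_add]
  by_cases hd0 : pvDig m = 0
  · -- digit sum 0: m = 0, both sides are true
    have hm0 : m = 0 := by
      by_contra hc
      have := pvDig_pos m (by omega)
      omega
    subst hm0
    rw [hd0]
    norm_num
    decide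
  · by_cases hd1 : pvDig m = 1
    · -- digit sum 1: A returns False via its guard, B via n == 0
      have hm1 : m ≠ 0 := by
        intro hc; subst hc; rw [pvDig_zero] at hd1; omega
      rw [hd1]
      norm_num
      omega
    · -- digit sum ≥ 2
      set d := pvDig m with hd
      have hd2 : 2 ≤ d := by omega
      have hm2 : 2 ≤ m := pvDig_ge_two m hd2
      have hs2 : (2 : Int) ≤ (d : Int) := by exact_mod_cast hd2
      have hn1 : (1 : Int) ≤ (m : Int) := by exact_mod_cast (by omega : 1 ≤ m)
      have hne1 : ¬ (((d : Int)) == 1) = true := by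
        simp only [beq_iff_eq]; exact_mod_cast hd1
      have hle1 : ¬ ((d : Int) ≤ 1) := by exact_mod_cast (by omega : ¬ (d : Nat) ≤ 1)
      rw [if_neg hne1, if_neg hle1]
      have hPow := pvPowLoopA_eq (d : Int) (m : Int) hs2 hn1 (m + 2) 1
        (by omega) (by rw [Int.toNat_natCast]; omega)
      have hDiv := pvDivLoopB_eq (d : Int) hs2 (m + 2) (m : Int) hn1
        (by rw [Int.toNat_natCast]; omega)
      have hiff : (∃ k : Nat, 1 ≤ k ∧ (d : Int) ^ k = (m : Int)) ↔
          (∃ k : Nat, (d : Int) ^ k = (m : Int)) := by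
        constructor
        · rintro ⟨k, _, hk⟩; exact ⟨k, hk⟩
        · rintro ⟨k, hk⟩
          rcases Nat.eq_zero_or_pos k with h0 | h0
          · exfalso; subst h0; simp at hk
            have : (2 : Int) ≤ (m : Int) := by exact_mod_cast hm2
            omega
          · exact ⟨k, h0, hk⟩
      apply Bool.eq_iff_iff.mpr
      rw [hPow, hiff, beq_iff_eq, hDiv]
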